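-- pv_equiv track=rewrite | github.com/tyfoon/AIRadar | ndpi_tailer.py | _normalize_ndpi_proto
-- ===== SOURCE A (Python) =====
-- _NDPI_SKIP: frozenset[str] = frozenset({
--     "TLS", "HTTP", "HTTPS", "DNS", "QUIC", "Unknown", "ICMP", "IGMP",
--     "NTP", "DHCP", "SSDP", "MDNS", "LLMNR", "STUN", "DTLS",
--     "SSL", "SSH", "FTP", "SMTP", "POP3", "IMAP",
--     "Cloudflare", "AmazonAWS", "GoogleCloud", "Azure", "AWS_EC2",
--     "Akamai", "Fastly", "CloudFront",
--     "TCP", "UDP", "ARP", "NetBIOS", "SMBv1", "SMBv23", "ICMPV6",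
--     "HTTP_Proxy", "UBNTAC2", "TPLINK_SHP", "TuyaLP",
--     "DoH_DoT", "Canonical", "Alibaba", "Tencent",
--     "AJP", "DHCPV6", "IMAPS",
--     "Cybersec", "AWS_S3",
-- })
--
-- def _normalize_ndpi_proto(proto: str) -> str | None:
--     """Normalize nDPI protocol name and return the base application name.
--
--     Handles compound names like 'TLS.YouTube', 'QUIC.Google', etc.
--     Returns None for generic/skippable protocols.
--     """
--     if not proto:
--         return None
--
--     # Strip common prefixes for compound protocols
--     # nDPI uses: TLS.YouTube, QUIC.Google, HTTP.UBNTAC2, IMAPS.GMail,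
--     # HTTP_Connect.GoogleServices, DTLS.Signal, SSL.Facebook
--     for prefix in ("TLS.", "QUIC.", "HTTP.", "SSL.", "DTLS.", "IMAPS.", "HTTP_Connect.", "HTTP_Proxy.", "NetBIOS."):
--         if proto.startswith(prefix):
--             proto = proto[len(prefix):]
--             break
--
--     if proto in _NDPI_SKIP:
--         return None
--
--     return proto
-- ===== SOURCE B (Python) =====
-- _NDPI_SKIP: frozenset = frozenset({
--     "TLS", "HTTP", "HTTPS", "DNS", "QUIC", "Unknown", "ICMP", "IGMP",
--     "NTP", "DHCP", "SSDP", "MDNS", "LLMNR", "STUN", "DTLS",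
--     "SSL", "SSH", "FTP", "SMTP", "POP3", "IMAP",
--     "Cloudflare", "AmazonAWS", "GoogleCloud", "Azure", "AWS_EC2",
--     "Akamai", "Fastly", "CloudFront",
--     "TCP", "UDP", "ARP", "NetBIOS", "SMBv1", "SMBv23", "ICMPV6",
--     "HTTP_Proxy", "UBNTAC2", "TPLINK_SHP", "TuyaLP",
--     "DoH_DoT", "Canonical", "Alibaba", "Tencent",
--     "AJP", "DHCPV6", "IMAPS",
--     "Cybersec", "AWS_S3",
-- })
--
-- _STRIP_HEADS: frozenset = frozenset({
--     "TLS", "QUIC", "HTTP", "SSL", "DTLS", "IMAPS",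
--     "HTTP_Connect", "HTTP_Proxy", "NetBIOS",
-- })
--
--
-- def _normalize_ndpi_proto(proto):
--     """Normalize nDPI protocol name and return the base application name."""
--     if not proto:
--         return None
--     head, sep, rest = proto.partition(".")
--     if sep and head in _STRIP_HEADS:
--         proto = rest
--     return None if proto in _NDPI_SKIP else proto
-- ===== Notes on version B (the rewrite author's own statement) =====
-- stated objective: idiomatic
-- what changed: Replaces A's ordered startswith-scan over nine dotted prefixes, with slice-by-prefix-length on break, by a single partition of the string at its first dot separator plus a frozenset lookup of the head token.
import Mathlib
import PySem

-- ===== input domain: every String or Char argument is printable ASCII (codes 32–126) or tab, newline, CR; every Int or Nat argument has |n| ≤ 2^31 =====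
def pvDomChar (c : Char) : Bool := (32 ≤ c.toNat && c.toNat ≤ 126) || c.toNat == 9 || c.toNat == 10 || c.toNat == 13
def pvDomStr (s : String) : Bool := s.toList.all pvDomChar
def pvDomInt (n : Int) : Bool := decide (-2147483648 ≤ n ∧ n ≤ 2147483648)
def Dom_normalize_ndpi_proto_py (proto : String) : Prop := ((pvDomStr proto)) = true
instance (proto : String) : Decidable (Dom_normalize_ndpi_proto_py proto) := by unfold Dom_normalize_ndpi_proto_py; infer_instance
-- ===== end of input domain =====

-- B replaces A's ordered startswith scan over nine dotted prefixes by one partition at the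
-- first dot plus a set lookup of the head token (objective: idiomatic; same cost).

-- the module constant _NDPI_SKIP (a frozenset), shared by both programs
def pvSkip : PySem.Set String := PySem.Set.ofList
  ["TLS", "HTTP", "HTTPS", "DNS", "QUIC", "Unknown", "ICMP", "IGMP",
   "NTP", "DHCP", "SSDP", "MDNS", "LLMNR", "STUN", "DTLS",
   "SSL", "SSH", "FTP", "SMTP", "POP3", "IMAP",
   "Cloudflare", "AmazonAWS", "GoogleCloud", "Azure", "AWS_EC2",
   "Akamai", "Fastly", "CloudFront",
   "TCP", "UDP", "ARP", "NetBIOS", "SMBv1", "SMBv23", "ICMPV6",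
   "HTTP_Proxy", "UBNTAC2", "TPLINK_SHP", "TuyaLP",
   "DoH_DoT", "Canonical", "Alibaba", "Tencent",
   "AJP", "DHCPV6", "IMAPS",
   "Cybersec", "AWS_S3"]

-- ===== PORT A =====
-- the tuple of prefixes A iterates over, in order
def pvPrefixes : List String :=
  ["TLS.", "QUIC.", "HTTP.", "SSL.", "DTLS.", "IMAPS.", "HTTP_Connect.", "HTTP_Proxy.", "NetBIOS."]

-- A's for-loop with break: first matching prefix is stripped (proto[len(prefix):]), then stop
def pvStripLoop : List String → String → String
  | [], p => p
  | q :: qs, p =>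
    if PySem.Str.startswith p q then PySem.Str.slice p (some (PySem.Str.len q)) none
    else pvStripLoop qs p

def normalize_ndpi_proto_py (proto : String) : Option String :=
  if proto = "" then none
  else
    let p := pvStripLoop pvPrefixes proto
    if p ∈ pvSkip then none else some p

-- ===== PORT B =====
-- the frozenset _STRIP_HEADS of B
def pvStripHeads : PySem.Set String := PySem.Set.ofList
  ["TLS", "QUIC", "HTTP", "SSL", "DTLS", "IMAPS", "HTTP_Connect", "HTTP_Proxy", "NetBIOS"]

def normalize_ndpi_proto_py_alt (proto : String) : Option String :=
  if proto = "" then none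
  else
    -- proto.partition(".") ported by hand (exact for the one-char separator on any string):
    -- head = chars before the first dot, sep nonempty iff some '.' occurs, rest = chars after it
    let l := proto.toList
    let head := l.takeWhile (· != '.')
    let p := if head.length < l.length ∧ String.ofList head ∈ pvStripHeads
             then String.ofList (l.drop (head.length + 1)) else proto
    if p ∈ pvSkip then none else some p

-- ===== PRECONDITION & SPEC =====
def Spec_normalize_ndpi_proto_py (proto : String) (out : Option String) : Prop := out = normalize_ndpi_proto_py_alt proto
instance (proto : String) (out : Option String) : Decidable (Spec_normalize_ndpi_proto_py proto out) := by unfold Spec_normalize_ndpi_proto_py; infer_instance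

-- ===== CLAIM (what is proved, stated in full; the proofs are below) =====
def Claim_equal_normalize_ndpi_proto_py : Prop := ∀ (proto : String), Dom_normalize_ndpi_proto_py proto → Spec_normalize_ndpi_proto_py proto (normalize_ndpi_proto_py proto)

-- ===== LEMMAS AND PROOFS =====

lemma pvOfListEq (h : List Char) (s : String) : String.ofList h = s ↔ h = s.toList := by
  constructor
  · intro e; have := congrArg String.toList e; simpa using this
  · rintro rfl; simp

lemma pvSliceDrop (s : String) (n : Nat) :
    PySem.Str.slice s (some (n : Int)) none = String.ofList (s.toList.drop n) := by
  have h : (PySem.Str.slice s (some (n : Int)) none).toList = s.toList.drop n := by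
    simp [PySem.List.slice_from]
  rw [← h, String.ofList_toList]

lemma pvSliceLen (s q : String) :
    PySem.Str.slice s (some (PySem.Str.len q)) none = String.ofList (s.toList.drop q.toList.length) := by
  have hl : PySem.Str.len q = ((q.toList.length : Nat) : Int) := by simp
  rw [hl, pvSliceDrop]

-- a dot-free token q followed by '.' is a prefix of l iff l's pre-dot segment is exactly q
lemma pvStripIff (q l : List Char) (hq : ∀ c ∈ q, (c != '.') = true) :
    (q ++ ['.']) <+: l ↔ (l.takeWhile (· != '.') = q ∧ q.length < l.length) := by
  constructor
  · rintro ⟨t, rfl⟩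
    refine ⟨?_, by simp⟩
    rw [List.append_assoc, List.takeWhile_append_of_pos hq]
    simp
  · rintro ⟨h1, h2⟩
    rcases hd : l.dropWhile (· != '.') with _ | ⟨c, t⟩
    · have hl : l.takeWhile (· != '.') = l := by
        simpa [hd] using List.takeWhile_append_dropWhile (p := (· != '.')) (l := l)
      rw [hl] at h1
      subst h1
      exact absurd h2 (lt_irrefl _)
    · have hc : c = '.' := by
        have := List.head_dropWhile_not (p := (· != '.')) (l := l) (by simp [hd])
        simpa [hd] using this
      refine ⟨t, ?_⟩
      rw [← List.takeWhile_append_dropWhile (p := (· != '.')) (l := l), h1, hd, hc]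
      simp

lemma pvSWexpand (p q : String) (qd : List Char)
    (hsplit : q.toList = qd ++ ['.']) (hdot : ∀ c ∈ qd, (c != '.') = true) :
    PySem.Str.startswith p q =
      decide (p.toList.takeWhile (· != '.') = qd ∧ qd.length < p.toList.length) := by
  have h := pvStripIff qd p.toList hdot
  rw [← hsplit] at h
  rw [Bool.eq_iff_iff, decide_eq_true_iff]
  simpa [PySem.Chars.startswith_iff] using h

lemma pvMemHeads (h : List Char) :
    String.ofList h ∈ pvStripHeads ↔
      (h = "TLS".toList ∨ h = "QUIC".toList ∨ h = "HTTP".toList ∨ h = "SSL".toList ∨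
       h = "DTLS".toList ∨ h = "IMAPS".toList ∨ h = "HTTP_Connect".toList ∨
       h = "HTTP_Proxy".toList ∨ h = "NetBIOS".toList) := by
  simp [pvStripHeads, PySem.Set.mem_ofList, pvOfListEq]

set_option maxRecDepth 20000 in
lemma pvStripEqAux (p : String) :
    pvStripLoop pvPrefixes p =
      (if (p.toList.takeWhile (· != '.')).length < p.toList.length ∧
          String.ofList (p.toList.takeWhile (· != '.')) ∈ pvStripHeads
       then String.ofList (p.toList.drop ((p.toList.takeWhile (· != '.')).length + 1))
       else p) := by
  simp only [pvPrefixes, pvStripLoop,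
    pvSWexpand p "TLS." "TLS".toList (by simp) (by simp),
    pvSWexpand p "QUIC." "QUIC".toList (by simp) (by simp),
    pvSWexpand p "HTTP." "HTTP".toList (by simp) (by simp),
    pvSWexpand p "SSL." "SSL".toList (by simp) (by simp),
    pvSWexpand p "DTLS." "DTLS".toList (by simp) (by simp),
    pvSWexpand p "IMAPS." "IMAPS".toList (by simp) (by simp),
    pvSWexpand p "HTTP_Connect." "HTTP_Connect".toList (by simp) (by simp),
    pvSWexpand p "HTTP_Proxy." "HTTP_Proxy".toList (by simp) (by simp),
    pvSWexpand p "NetBIOS." "NetBIOS".toList (by simp) (by simp),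
    pvSliceLen, pvMemHeads, decide_eq_true_eq]
  split_ifs <;> simp_all
  all_goals
    (rcases ‹_ ∧ _› with ⟨hlen, hdisj⟩
     rcases hdisj with h|h|h|h|h|h|h|h|h <;> (simp_all; omega))

-- ===== VERDICT (by name: the statement is the Claim_ definition above) =====
theorem normalize_ndpi_proto_py_spec : Claim_equal_normalize_ndpi_proto_py := by
  intro proto _
  unfold Spec_normalize_ndpi_proto_py normalize_ndpi_proto_py normalize_ndpi_proto_py_alt
  rw [pvStripEqAux]
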